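-- pv_equiv track=rewrite | github.com/akikohaku/kohaku_bot | image_process/process.py | get_valid_split_regions
-- ===== SOURCE A (Python) =====
-- def get_valid_split_regions(split_regions, total_height):
--     """根据分割区域生成有效的拆分区域"""
--     split_points = []
--     prev_end = -1
--
--     for start, end in split_regions:
--         split_points.append((prev_end + 1, start - 1))
--         prev_end = end
--
--     split_points.append((prev_end + 1, total_height - 1))
--
--     return [(s, e) for s, e in split_points if s <= e]
-- ===== SOURCE B (Python) =====
-- def get_valid_split_regions(split_regions, total_height):
--     """根据分割区域生成有效的拆分区域"""
--     def gaps(prev_end, regions):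
--         if not regions:
--             s, e = prev_end + 1, total_height - 1
--             return [(s, e)] if s <= e else []
--         (start, end), rest = regions[0], regions[1:]
--         head = [(prev_end + 1, start - 1)] if prev_end + 1 <= start - 1 else []
--         return head + gaps(end, rest)
--     return gaps(-1, list(split_regions))
-- ===== Notes on version B (the rewrite author's own statement) =====
-- stated objective: alternative
-- what changed: Replaces the imperative accumulator loop plus separate filtering pass by a structural recursion over the region list that emits each valid gap inline, building no intermediate split_points list and needing no final filter.
import Mathlib
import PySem

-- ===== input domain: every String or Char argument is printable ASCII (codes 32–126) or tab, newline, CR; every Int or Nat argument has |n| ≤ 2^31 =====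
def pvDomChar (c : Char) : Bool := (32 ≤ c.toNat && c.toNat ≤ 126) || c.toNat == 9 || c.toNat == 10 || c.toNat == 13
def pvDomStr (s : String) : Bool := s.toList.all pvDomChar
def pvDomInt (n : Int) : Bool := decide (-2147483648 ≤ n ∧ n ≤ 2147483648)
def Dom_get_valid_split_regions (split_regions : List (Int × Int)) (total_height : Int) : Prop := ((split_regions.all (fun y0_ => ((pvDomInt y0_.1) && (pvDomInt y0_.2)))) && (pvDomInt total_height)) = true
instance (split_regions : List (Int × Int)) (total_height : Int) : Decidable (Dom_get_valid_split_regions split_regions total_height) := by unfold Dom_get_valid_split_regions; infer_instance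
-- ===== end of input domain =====

-- ===== PORT A =====
-- transliteration of A: foldl carrying (split_points, prev_end), append tail gap, then filter
def get_valid_split_regions (split_regions : List (Int × Int)) (total_height : Int) : List (Int × Int) :=
  let st := split_regions.foldl
    (fun (acc : List (Int × Int) × Int) se =>
      (acc.1 ++ [(acc.2 + 1, se.1 - 1)], se.2)) ([], -1)
  let split_points := st.1 ++ [(st.2 + 1, total_height - 1)]
  split_points.filter (fun se => decide (se.1 ≤ se.2))

-- ===== PORT B =====
-- B helper: recursion over the region list, emitting each valid gap inline (Source B's gaps)
def gvsrGaps (total_height prev_end : Int) : List (Int × Int) → List (Int × Int)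
  | [] =>
      if prev_end + 1 ≤ total_height - 1 then [(prev_end + 1, total_height - 1)] else []
  | (start, stop) :: rest =>
      (if prev_end + 1 ≤ start - 1 then [(prev_end + 1, start - 1)] else []) ++
        gvsrGaps total_height stop rest

-- transliteration of B: recursive inline-filtering construction
def get_valid_split_regions_alt (split_regions : List (Int × Int)) (total_height : Int) : List (Int × Int) :=
  gvsrGaps total_height (-1) split_regions

-- ===== PRECONDITION & SPEC =====
def Spec_get_valid_split_regions (split_regions : List (Int × Int)) (total_height : Int) (out : List (Int × Int)) : Prop := out = get_valid_split_regions_alt split_regions total_height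
instance (split_regions : List (Int × Int)) (total_height : Int) (out : List (Int × Int)) : Decidable (Spec_get_valid_split_regions split_regions total_height out) := by unfold Spec_get_valid_split_regions; infer_instance

-- ===== CLAIM (what is proved, stated in full; the proofs are below) =====
def Claim_equal_get_valid_split_regions : Prop := ∀ (split_regions : List (Int × Int)) (total_height : Int), Dom_get_valid_split_regions split_regions total_height → Spec_get_valid_split_regions split_regions total_height (get_valid_split_regions split_regions total_height)

-- ===== LEMMAS AND PROOFS =====
lemma pv_foldl_gaps (th : Int) (xs : List (Int × Int)) (acc : List (Int × Int)) (prev : Int) :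
    (let st := xs.foldl (fun (a : List (Int × Int) × Int) se =>
        (a.1 ++ [(a.2 + 1, se.1 - 1)], se.2)) (acc, prev)
     (st.1 ++ [(st.2 + 1, th - 1)]).filter (fun se => decide (se.1 ≤ se.2))) =
    acc.filter (fun se => decide (se.1 ≤ se.2)) ++ gvsrGaps th prev xs := by
  induction xs generalizing acc prev with
  | nil =>
      simp only [List.foldl_nil, List.filter_append, gvsrGaps]
      split <;> simp_all
  | cons h t ih =>
      obtain ⟨s, e⟩ := h
      simp only [List.foldl_cons]
      rw [ih]
      simp only [gvsrGaps, List.filter_append, List.append_assoc]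
      congr 1
      split <;> simp_all

-- ===== VERDICT (by name: the statement is the Claim_ definition above) =====
theorem get_valid_split_regions_spec : Claim_equal_get_valid_split_regions := by
  intro xs th _
  unfold Spec_get_valid_split_regions get_valid_split_regions get_valid_split_regions_alt
  rw [pv_foldl_gaps th xs [] (-1)]
  simp
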